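-- pv_equiv track=rewrite | github.com/ArsanAbdi/iut_final | OTHERS/generateur.py | generateur_fibonacci_v1
-- ===== SOURCE A (Python) =====
-- from typing import Generator
--
-- def generateur_fibonacci_v1(debut: int, fin: int, pas: int = 1) -> Generator[int, None, None]:
--     """
--     Génère la séquence de Fibonacci dans un intervalle donné.
--
--     Args:
--         debut (int): Le début de l'intervalle.
--         fin (int): La fin de l'intervalle.
--         pas (int): Le pas pour itérer sur les nombres (par défaut 1).
--
--     Yields:
--         Generator[int, None, None]: Un générateur produisant la séquence de Fibonacci dans l'intervalle donné.
--     """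
--     compteur = 0
--     ancien_nombre = 0
--     nombre_actuel = 1
--
--     while compteur < fin - 1:
--
--         if compteur >= debut - 1 and compteur % pas == 0:
--             yield ancien_nombre
--
--         compteur += 1
--         nombre_suivant = ancien_nombre + nombre_actuel
--         ancien_nombre = nombre_actuel
--         nombre_actuel = nombre_suivant
-- ===== SOURCE B (Python) =====
-- def _fib(n):
--     # Fast-doubling Fibonacci: returns F(n) directly from the binary digits of n.
--     bits = []
--     while n > 0:
--         bits.append(n & 1)
--         n >>= 1
--     a, b = 0, 1  # (F(k), F(k+1)) for the prefix of bits processed so far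
--     for bit in reversed(bits):
--         a, b = a * (2 * b - a), a * a + b * b
--         if bit:
--             a, b = b, a + b
--     return a
--
-- def generateur_fibonacci_v1(debut: int, fin: int, pas: int = 1):
--     # The selected indices are exactly the multiples of |pas| in [max(debut-1,0), fin-2]:
--     # walk that arithmetic progression and compute each F(i) independently.
--     lo = max(debut - 1, 0)
--     hi = fin - 1
--     if lo < hi:
--         p = abs(pas)
--         first = ((lo + p - 1) // p) * p  # least multiple of p that is >= lo
--         for i in range(first, hi, p):
--             yield _fib(i)
-- ===== Notes on version B (the rewrite author's own statement) =====
-- stated objective: faster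
-- what changed: A rolls the Fibonacci recurrence through every index up to fin-2 and filters on the fly; B first computes the selected indices in closed form as the arithmetic progression of multiples of |pas| in [max(debut-1,0), fin-2], then computes each selected F(i) independently by fast doubling on the binary digits of i, skipping all unselected indices.
import Mathlib
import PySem

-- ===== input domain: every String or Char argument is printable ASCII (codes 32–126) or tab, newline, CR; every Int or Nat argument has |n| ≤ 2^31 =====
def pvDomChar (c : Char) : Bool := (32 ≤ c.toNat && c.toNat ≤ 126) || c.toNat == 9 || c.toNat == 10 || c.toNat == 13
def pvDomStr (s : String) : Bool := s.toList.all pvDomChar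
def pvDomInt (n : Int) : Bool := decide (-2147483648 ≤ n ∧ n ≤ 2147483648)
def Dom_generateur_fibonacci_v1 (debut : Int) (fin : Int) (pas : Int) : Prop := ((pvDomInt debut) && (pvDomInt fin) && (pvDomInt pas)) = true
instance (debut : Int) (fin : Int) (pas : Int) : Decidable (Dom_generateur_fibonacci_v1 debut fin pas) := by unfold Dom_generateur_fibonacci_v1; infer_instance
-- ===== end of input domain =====

-- B replaces A's rolling recurrence-plus-filter loop by a closed-form arithmetic
-- progression of the selected indices with an independent fast-doubling computation
-- of each F(i), skipping all unselected indices (objective: faster, measured by the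
-- timing run). Both are generators; the proved equality is about the yielded list.

-- ===== PORT A =====
-- A's while-loop with compteur += 1 is the fold over range(0, fin-1); state (yielded, ancien, actuel).
def generateur_fibonacci_v1 (debut : Int) (fin : Int) (pas : Int) : List Int :=
  ((PySem.List.pyRange 0 (fin - 1) 1).foldl
    (fun (st : List Int × Int × Int) compteur =>
      let acc := if compteur ≥ debut - 1 ∧ PySem.Int.mod compteur pas = 0
                 then st.1 ++ [st.2.1] else st.1
      (acc, st.2.2, st.2.1 + st.2.2))
    (([] : List Int), (0 : Int), (1 : Int))).1

-- ===== PORT B =====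
-- _fib's `while n > 0: bits.append(n & 1); n >>= 1` loop, LSB first.
def pvFastFibBits : Nat → List Bool
  | 0 => []
  | (n + 1) => decide ((n + 1) % 2 = 1) :: pvFastFibBits ((n + 1) / 2)

-- _fib's fold over reversed(bits): fast doubling on the binary digits of n.
def pvFastFib (n : Nat) : Int :=
  ((pvFastFibBits n).reverse.foldl
    (fun (st : Int × Int) bit =>
      let a := st.1
      let b := st.2
      let st' := (a * (2 * b - a), a * a + b * b)
      if bit then (st'.2, st'.1 + st'.2) else st')
    ((0 : Int), (1 : Int))).1

def generateur_fibonacci_v1_alt (debut : Int) (fin : Int) (pas : Int) : List Int :=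
  let lo := max (debut - 1) 0
  let hi := fin - 1
  if lo < hi then
    let p := |pas|
    let first := PySem.Int.floordiv (lo + p - 1) p * p
    (PySem.List.pyRange first hi p).foldl (fun acc i => acc ++ [pvFastFib i.toNat]) []
  else []

-- ===== PRECONDITION & SPEC =====
-- Pre_ excludes exactly the inputs where A raises ZeroDivisionError: pas = 0 and some
-- loop index reaches the short-circuited modulo test (max(debut-1,0) < fin-1).
def Pre_generateur_fibonacci_v1 (debut : Int) (fin : Int) (pas : Int) : Prop :=
  ¬ (pas = 0 ∧ max (debut - 1) 0 < fin - 1)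
instance (debut : Int) (fin : Int) (pas : Int) : Decidable (Pre_generateur_fibonacci_v1 debut fin pas) := by
  unfold Pre_generateur_fibonacci_v1; infer_instance

def pvWitness_generateur_fibonacci_v1 : Int × Int × Int := (2, 8, 2)

def Spec_generateur_fibonacci_v1 (debut : Int) (fin : Int) (pas : Int) (out : List Int) : Prop :=
  out = generateur_fibonacci_v1_alt debut fin pas
instance (debut : Int) (fin : Int) (pas : Int) (out : List Int) : Decidable (Spec_generateur_fibonacci_v1 debut fin pas out) := by
  unfold Spec_generateur_fibonacci_v1; infer_instance

-- ===== CLAIM (what is proved, stated in full; the proofs are below) =====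
def Claim_equal_generateur_fibonacci_v1 : Prop := ∀ (debut : Int) (fin : Int) (pas : Int), Dom_generateur_fibonacci_v1 debut fin pas → Pre_generateur_fibonacci_v1 debut fin pas → Spec_generateur_fibonacci_v1 debut fin pas (generateur_fibonacci_v1 debut fin pas)

-- ===== LEMMAS AND PROOFS =====

-- A's Fibonacci state value
def pvFib : Nat → Int
  | 0 => 0
  | 1 => 1
  | (n + 2) => pvFib n + pvFib (n + 1)

theorem pvFib_eq_fib (n : Nat) : pvFib n = (Nat.fib n : Int) := by
  induction n using pvFib.induct with
  | case1 => simp [pvFib]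
  | case2 => simp [pvFib]
  | case3 n ih1 ih2 => rw [pvFib, ih1, ih2, Nat.fib_add_two]; push_cast; ring

-- fast doubling computes (F n, F (n+1))
theorem pvFastFib_state (n : Nat) :
    (pvFastFibBits n).reverse.foldl
      (fun (st : Int × Int) bit =>
        let a := st.1
        let b := st.2
        let st' := (a * (2 * b - a), a * a + b * b)
        if bit then (st'.2, st'.1 + st'.2) else st')
      ((0 : Int), (1 : Int))
    = ((Nat.fib n : Int), (Nat.fib (n + 1) : Int)) := by
  induction n using pvFastFibBits.induct with
  | case1 => simp [pvFastFibBits]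
  | case2 n ih =>
    rw [pvFastFibBits, List.reverse_cons, List.foldl_append, ih]
    have hle : Nat.fib ((n + 1) / 2) ≤ 2 * Nat.fib ((n + 1) / 2 + 1) := by
      have := @Nat.fib_le_fib_succ ((n + 1) / 2); omega
    have h2m : (Nat.fib (2 * ((n + 1) / 2)) : Int)
        = (Nat.fib ((n + 1) / 2) : Int) * (2 * (Nat.fib ((n + 1) / 2 + 1) : Int) - (Nat.fib ((n + 1) / 2) : Int)) := by
      rw [Nat.fib_two_mul, Nat.cast_mul, Nat.cast_sub hle]; push_cast; ring
    have h2m1 : (Nat.fib (2 * ((n + 1) / 2) + 1) : Int)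
        = (Nat.fib ((n + 1) / 2) : Int) * (Nat.fib ((n + 1) / 2) : Int)
          + (Nat.fib ((n + 1) / 2 + 1) : Int) * (Nat.fib ((n + 1) / 2 + 1) : Int) := by
      rw [Nat.fib_two_mul_add_one]; push_cast; ring
    rcases Nat.mod_two_eq_zero_or_one (n + 1) with hr | hr
    · have hn : 2 * ((n + 1) / 2) = n + 1 := by omega
      simp only [List.foldl_cons, List.foldl_nil, hr]
      norm_num
      rw [← h2m, ← h2m1, hn]
      exact ⟨rfl, rfl⟩
    · have hn : 2 * ((n + 1) / 2) + 1 = n + 1 := by omega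
      simp only [List.foldl_cons, List.foldl_nil, hr]
      norm_num
      rw [← h2m, ← h2m1, hn]
      constructor
      · rfl
      · rw [show n + 1 + 1 = (2 * ((n + 1) / 2)) + 2 by omega, Nat.fib_add_two, hn]
        push_cast; ring

theorem pvFastFib_eq (n : Nat) : pvFastFib n = pvFib n := by
  rw [pvFastFib, pvFastFib_state, pvFib_eq_fib]

-- the common selection result (A's characterization)
def pvSel (debut pas : Int) (n : Nat) : List Int :=
  (List.range n).foldl
    (fun (acc : List Int) (k : Nat) =>
      if (k : Int) ≥ debut - 1 ∧ PySem.Int.mod (k : Int) pas = 0 then acc ++ [pvFib k] else acc)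
    []

theorem pvSel_succ (debut pas : Int) (n : Nat) :
    pvSel debut pas (n + 1)
    = if (n : Int) ≥ debut - 1 ∧ PySem.Int.mod (n : Int) pas = 0
      then pvSel debut pas n ++ [pvFib n] else pvSel debut pas n := by
  unfold pvSel
  rw [List.range_succ, List.foldl_append]
  simp

theorem pvA_char (debut pas : Int) (n : Nat) :
    ((PySem.List.pyRange 0 (n : Int) 1).foldl
      (fun (st : List Int × Int × Int) compteur =>
        let acc := if compteur ≥ debut - 1 ∧ PySem.Int.mod compteur pas = 0
                   then st.1 ++ [st.2.1] else st.1
        (acc, st.2.2, st.2.1 + st.2.2))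
      (([] : List Int), (0 : Int), (1 : Int)))
    = (pvSel debut pas n, pvFib n, pvFib (n + 1)) := by
  induction n with
  | zero => simp [PySem.List.pyRange_one_eq_nil, pvSel, pvFib]
  | succ n ih =>
    have h : ((n : Int) + 1) = ((n + 1 : Nat) : Int) := by push_cast; ring
    rw [← h, PySem.List.pyRange_one_succ_right (by positivity), List.foldl_append, ih]
    simp only [List.foldl_cons, List.foldl_nil, pvSel_succ]
    rfl

-- the A-side boolean selection predicate over Nat indices
def pvPred (debut pas : Int) (k : Nat) : Bool :=
  decide (debut - 1 ≤ (k : Int)) && decide (PySem.Int.mod (k : Int) pas = 0)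

theorem pvSel_filter (debut pas : Int) (n : Nat) :
    pvSel debut pas n = ((List.range n).filter (pvPred debut pas)).map pvFib := by
  induction n with
  | zero => simp [pvSel]
  | succ n ih =>
    rw [pvSel_succ, List.range_succ, List.filter_append, List.map_append, ih]
    by_cases h : (n : Int) ≥ debut - 1 ∧ PySem.Int.mod (n : Int) pas = 0
    · rw [if_pos h]
      have : pvPred debut pas n = true := by
        simp [pvPred, h.1, h.2]
      simp [this]
    · rw [if_neg h]
      have : pvPred debut pas n = false := by
        simp only [pvPred, Bool.and_eq_false_iff, decide_eq_false_iff_not]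
        by_cases h1 : debut - 1 ≤ (n : Int)
        · right; intro h2; exact h ⟨h1, h2⟩
        · left; exact h1
      simp [this]

-- sorted lists with the same elements are equal
theorem pv_eq_of_pairwise_mem {l1 l2 : List Int}
    (h1 : l1.Pairwise (· < ·)) (h2 : l2.Pairwise (· < ·))
    (hm : ∀ x, x ∈ l1 ↔ x ∈ l2) : l1 = l2 := by
  have nd1 : l1.Nodup := h1.imp (fun h => ne_of_lt h)
  have nd2 : l2.Nodup := h2.imp (fun h => ne_of_lt h)
  exact List.Perm.eq_of_pairwise (le := (· ≤ ·))
    (fun a b _ _ hab hba => le_antisymm hab hba)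
    (h1.imp le_of_lt) (h2.imp le_of_lt)
    ((List.perm_ext_iff_of_nodup nd1 nd2).mpr hm)

-- the index lists coincide: filtered range = arithmetic progression of multiples
theorem pv_idx_eq (debut pas : Int) (hpas : pas ≠ 0) (n : Nat) :
    ((List.range n).filter (pvPred debut pas)).map (Nat.cast : Nat → Int)
    = PySem.List.pyRange
        (PySem.Int.floordiv (max (debut - 1) 0 + |pas| - 1) |pas| * |pas|) (n : Int) |pas| := by
  have hp : (0 : Int) < |pas| := abs_pos.mpr hpas
  set lo : Int := max (debut - 1) 0 with hlo
  set q : Int := PySem.Int.floordiv (lo + |pas| - 1) |pas| with hq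
  have hqb : q * |pas| ≤ lo + |pas| - 1 ∧ lo + |pas| - 1 < (q + 1) * |pas| :=
    (PySem.Int.floordiv_eq_iff_of_pos hp).mp hq.symm
  have hfl : lo ≤ q * |pas| := by
    have := hqb.2; nlinarith
  apply pv_eq_of_pairwise_mem
  · rw [List.pairwise_map]
    exact (List.pairwise_lt_range.filter _).imp (by intro a b h; exact_mod_cast h)
  · rw [PySem.List.pyRange_of_pos _ _ hp, List.pairwise_map]
    refine List.pairwise_lt_range.imp ?_
    intro a b h
    have : (a : Int) < (b : Int) := by exact_mod_cast h
    nlinarith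
  · intro x
    rw [PySem.List.mem_pyRange_iff_of_pos hp x]
    simp only [List.mem_map, List.mem_filter, List.mem_range, pvPred,
      Bool.and_eq_true, decide_eq_true_eq]
    constructor
    · rintro ⟨k, ⟨⟨hk, hge, hmod⟩, rfl⟩⟩
      have hdvd : |pas| ∣ (k : Int) := (abs_dvd _ _).mpr ((PySem.Int.mod_eq_zero_iff_dvd _ _).mp hmod)
      obtain ⟨t, ht⟩ := hdvd
      have hklo : lo ≤ (k : Int) := by
        have : (0 : Int) ≤ (k : Int) := Int.natCast_nonneg k
        omega
      have hqt : q ≤ t := by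
        by_contra hlt
        rw [not_le] at hlt
        have : t ≤ q - 1 := by omega
        have h1 : |pas| * t ≤ |pas| * (q - 1) := mul_le_mul_of_nonneg_left this hp.le
        have h2 : (q - 1) * |pas| ≤ lo - 1 := by nlinarith [hqb.1]
        nlinarith
      refine ⟨by nlinarith, by exact_mod_cast hk, ⟨t - q, by rw [ht]; ring⟩⟩
    · rintro ⟨hge, hlt, ⟨t, ht⟩⟩
      have hx0 : (0 : Int) ≤ x := le_trans (le_trans (le_max_right _ _) hfl) hge
      refine ⟨x.toNat, ⟨⟨?_, ?_, ?_⟩, Int.toNat_of_nonneg hx0⟩⟩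
      · have : (x.toNat : Int) < (n : Int) := by rw [Int.toNat_of_nonneg hx0]; exact hlt
        exact_mod_cast this
      · rw [Int.toNat_of_nonneg hx0]
        have : debut - 1 ≤ lo := le_max_left _ _
        omega
      · rw [Int.toNat_of_nonneg hx0, PySem.Int.mod_eq_zero_iff_dvd]
        rw [← abs_dvd]
        exact ⟨q + t, by linarith [ht]⟩

-- inside the interval nothing is selected when the whole range is below debut-1
theorem pv_filter_nil (debut pas : Int) (n : Nat) (h : (n : Int) ≤ debut - 1) :
    (List.range n).filter (pvPred debut pas) = [] := by
  rw [List.filter_eq_nil_iff]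
  intro k hk
  simp only [List.mem_range] at hk
  have hlt : (k : Int) < (n : Int) := by exact_mod_cast hk
  have hnot : ¬ (debut - 1 ≤ (k : Int)) := by omega
  simp [pvPred, hnot]

theorem pv_main (debut fin pas : Int) (hpre : Pre_generateur_fibonacci_v1 debut fin pas) :
    generateur_fibonacci_v1 debut fin pas = generateur_fibonacci_v1_alt debut fin pas := by
  unfold generateur_fibonacci_v1 generateur_fibonacci_v1_alt Pre_generateur_fibonacci_v1 at *
  by_cases hfin : fin - 1 ≤ 0
  · rw [PySem.List.pyRange_one_eq_nil hfin]
    have : ¬ (max (debut - 1) 0 < fin - 1) := by omega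
    simp [this]
  · rw [not_le] at hfin
    obtain ⟨n, hn⟩ : ∃ n : Nat, fin - 1 = (n : Int) :=
      ⟨(fin - 1).toNat, (Int.toNat_of_nonneg (by omega)).symm⟩
    rw [hn, pvA_char]
    by_cases hlh : max (debut - 1) 0 < fin - 1
    · have hpas : pas ≠ 0 := fun h0 => hpre ⟨h0, hlh⟩
      rw [hn] at hlh
      simp only [hlh, if_pos]
      rw [PySem.List.foldl_append_singleton_eq_map, List.nil_append,
        pvSel_filter, ← pv_idx_eq debut pas hpas n, List.map_map]
      simp [Function.comp_def, pvFastFib_eq]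
    · rw [hn] at hlh
      simp only [hlh, if_false]
      rw [pvSel_filter, pv_filter_nil, List.map_nil]
      have h0 : (0 : Int) ≤ max (debut - 1) 0 := le_max_right _ _
      rw [hn] at hfin
      omega

-- ===== VERDICT (by name: the statement is the Claim_ definition above) =====
theorem generateur_fibonacci_v1_spec : Claim_equal_generateur_fibonacci_v1 := by
  intro debut fin pas _ hpre
  exact pv_main debut fin pas hpre
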